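-- pv_equiv track=rewrite | github.com/DavronDostqobilov/list_modification | list_mod14.py | replace_minimun_with_0
-- ===== SOURCE A (Python) =====
-- def replace_minimun_with_0(lst):
--     """Given the list of numbers, Replace the mininum numbers in the list with 0.
--
--     Args:
--         lst (list): list of numbers
--     Returns:
--         list: list minimum numbers are replaced with 0
--     """
--     mn=lst[0]
--     for i in range(len(lst)):
--         if mn>lst[i]:
--             mn=lst[i]
--     lst.pop(lst.index(mn))
--     lst.insert(0,0)
--     return lst
-- ===== SOURCE B (Python) =====
-- def replace_minimun_with_0(lst):
--     """Replace the (first) minimum element of lst with 0 and move it to the front.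
--
--     Instead of scanning for the minimum by hand and re-locating it with
--     lst.index(), take the minimum as the head of a sorted copy and let
--     list.remove delete its first occurrence.  Mutates lst in place like
--     the original.
--     """
--     m = sorted(lst)[0]
--     lst.remove(m)
--     lst.insert(0, 0)
--     return lst
-- ===== Notes on version B (the rewrite author's own statement) =====
-- stated objective: alternative
-- what changed: A hand-scans for the minimum value and then re-scans with lst.index() before pop(); B obtains the minimum as the head of a sorted copy and deletes its first occurrence with list.remove, replacing both manual scans with library calls.
import Mathlib
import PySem

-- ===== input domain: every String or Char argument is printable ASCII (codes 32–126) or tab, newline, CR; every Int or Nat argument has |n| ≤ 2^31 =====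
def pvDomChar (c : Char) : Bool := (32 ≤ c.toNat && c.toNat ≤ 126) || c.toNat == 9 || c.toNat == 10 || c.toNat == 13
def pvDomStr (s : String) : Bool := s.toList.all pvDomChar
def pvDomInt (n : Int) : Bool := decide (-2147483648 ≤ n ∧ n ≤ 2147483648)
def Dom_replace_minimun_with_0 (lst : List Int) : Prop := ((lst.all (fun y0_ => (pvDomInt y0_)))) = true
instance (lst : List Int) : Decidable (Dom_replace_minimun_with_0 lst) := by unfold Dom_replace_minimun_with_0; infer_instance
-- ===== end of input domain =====

-- B takes the minimum as the head of sorted(lst) and removes its first occurrence with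
-- list.remove, instead of A's manual min-scan plus lst.index() re-scan (alternative mechanism,
-- not claimed faster). Both Pythons mutate the argument in place (pop/remove/insert); the
-- equivalence proved here is about the RETURN value.

-- ===== PORT A =====
-- A: mn = lst[0]; for i in range(len(lst)): if mn > lst[i]: mn = lst[i]; lst.pop(lst.index(mn)); lst.insert(0,0)
def replace_minimun_with_0 (lst : List Int) : List Int :=
  match PySem.List.pyGet? lst 0 with
  | none => []  -- lst[0] raises IndexError on []: excluded by Pre_
  | some m0 =>
    let mn := (PySem.List.pyRange 0 (PySem.List.len lst) 1).foldl
      (fun mn i => if mn > PySem.List.pyGetD lst i 0 then PySem.List.pyGetD lst i 0 else mn) m0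
    match PySem.List.index? lst mn with
    | none => []  -- unreachable: mn is an element of lst
    | some idx =>
      match PySem.List.pop? lst (idx : Int) with
      | none => []  -- unreachable: idx in range
      | some (_, rest) => PySem.List.insert rest 0 0

-- ===== PORT B =====
-- B: m = sorted(lst)[0]; lst.remove(m); lst.insert(0, 0)
def replace_minimun_with_0_alt (lst : List Int) : List Int :=
  match PySem.List.pyGet? (PySem.List.sorted lst (fun x => x) false) 0 with
  | none => []  -- sorted(lst)[0] raises IndexError on []: excluded by Pre_
  | some m =>
    match PySem.List.remove? lst m with
    | none => []  -- unreachable: m is an element of lst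
    | some rest => PySem.List.insert rest 0 0

-- ===== PRECONDITION & SPEC =====
-- A raises IndexError (lst[0]) on the empty list; B raises there too (sorted(lst)[0]).
def Pre_replace_minimun_with_0 (lst : List Int) : Prop := lst ≠ []
instance (lst : List Int) : Decidable (Pre_replace_minimun_with_0 lst) := by
  unfold Pre_replace_minimun_with_0; infer_instance
def pvWitness_replace_minimun_with_0 : List Int := [3, 1, 2]

def Spec_replace_minimun_with_0 (lst : List Int) (out : List Int) : Prop := out = replace_minimun_with_0_alt lst
instance (lst : List Int) (out : List Int) : Decidable (Spec_replace_minimun_with_0 lst out) := by unfold Spec_replace_minimun_with_0; infer_instance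

-- ===== CLAIM (what is proved, stated in full; the proofs are below) =====
def Claim_equal_replace_minimun_with_0 : Prop := ∀ (lst : List Int), Dom_replace_minimun_with_0 lst → Pre_replace_minimun_with_0 lst → Spec_replace_minimun_with_0 lst (replace_minimun_with_0 lst)

-- ===== LEMMAS AND PROOFS =====

-- A's running minimum is List.foldl min
lemma pv_fold_is_min (lst : List Int) (m0 : Int) :
    lst.foldl (fun mn v => if mn > v then v else mn) m0 = lst.foldl min m0 := by
  induction lst generalizing m0 with
  | nil => rfl
  | cons x xs ih =>
    simp only [List.foldl_cons, ih]
    congr 1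
    by_cases h : m0 > x
    · simp [h, le_of_lt h]
    · simp [h, not_lt.mp h]

lemma pv_foldl_min_mem (lst : List Int) (a : Int) :
    lst.foldl min a = a ∨ lst.foldl min a ∈ lst := by
  induction lst generalizing a with
  | nil => exact Or.inl rfl
  | cons x xs ih =>
    simp only [List.foldl_cons]
    rcases ih (min a x) with h | h
    · rw [h]
      rcases min_choice a x with h' | h'
      · exact Or.inl h'
      · exact Or.inr (by rw [h']; exact List.mem_cons_self)
    · exact Or.inr (List.mem_cons_of_mem _ h)

lemma pv_foldl_min_le (lst : List Int) (a : Int) :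
    lst.foldl min a ≤ a ∧ ∀ y ∈ lst, lst.foldl min a ≤ y := by
  induction lst generalizing a with
  | nil => exact ⟨le_refl _, by simp⟩
  | cons x xs ih =>
    obtain ⟨h1, h2⟩ := ih (min a x)
    refine ⟨le_trans h1 (min_le_left _ _), ?_⟩
    intro y hy
    rcases List.mem_cons.mp hy with rfl | hy
    · exact le_trans h1 (min_le_right _ _)
    · exact h2 y hy

-- removing the element at the index of the first occurrence of v is List.erase
lemma pv_eraseIdx_eq_erase : ∀ (xs : List Int) (k : Nat) (v : Int), k < xs.length →
    (∀ (hk : k < xs.length), xs[k] = v) → (∀ j (hj : j < xs.length), j < k → xs[j] ≠ v) →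
    xs.eraseIdx k = xs.erase v := by
  intro xs
  induction xs with
  | nil => intro k v hk _ _; exact absurd hk (Nat.not_lt_zero k)
  | cons x t ih =>
    intro k v hk hv hne
    cases k with
    | zero =>
      have : x = v := hv hk
      subst this
      simp [List.eraseIdx, List.erase_cons_head]
    | succ k =>
      have hx : x ≠ v := hne 0 (by simp) (Nat.succ_pos k)
      rw [List.eraseIdx_cons_succ, List.erase_cons_tail (by simpa using hx)]
      have := ih k v (by simpa using hk)
        (fun hk' => by simpa using hv (by simpa using hk))
        (fun j hj hjk => by
          have := hne (j + 1) (by simpa using hj) (by omega)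
          simpa using this)
      rw [this]

theorem replace_minimun_with_0_spec_aux (lst : List Int) (hpre : lst ≠ []) :
    replace_minimun_with_0 lst = replace_minimun_with_0_alt lst := by
  obtain ⟨x, xs, rfl⟩ := List.exists_cons_of_ne_nil hpre
  -- A's running minimum mn
  have hfold : (PySem.List.pyRange 0 (PySem.List.len (x :: xs)) 1).foldl
      (fun mn i => if mn > PySem.List.pyGetD (x :: xs) i 0 then PySem.List.pyGetD (x :: xs) i 0 else mn) x
      = (x :: xs).foldl min x := by
    rw [PySem.List.foldl_pyRange_zero_pyGetD (x :: xs) 0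
      (fun mn v => if mn > v then v else mn) x, pv_fold_is_min]
  set mn := (x :: xs).foldl min x with hmn
  have hmn_mem : mn ∈ x :: xs := by
    rcases pv_foldl_min_mem (x :: xs) x with h | h
    · rw [hmn, h]; exact List.mem_cons_self
    · exact h
  have hmn_le : ∀ y ∈ x :: xs, mn ≤ y := (pv_foldl_min_le (x :: xs) x).2
  -- B's minimum value m: head of the sorted list
  obtain ⟨m, t, hsort⟩ : ∃ m t, PySem.List.sorted (x :: xs) (fun x => x) false = m :: t := by
    cases hs : PySem.List.sorted (x :: xs) (fun x => x) false with
    | nil =>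
      exact absurd ((PySem.List.sorted_eq_nil_iff (x :: xs) (fun x => x) false).mp hs)
        (List.cons_ne_nil x xs)
    | cons m t => exact ⟨m, t, rfl⟩
  have hm_mem : m ∈ x :: xs :=
    (PySem.List.sorted_perm (x :: xs) (fun x => x) false).mem_iff.mp
      (by rw [hsort]; exact List.mem_cons_self)
  have hm_le : ∀ y ∈ x :: xs, m ≤ y :=
    PySem.List.key_head_sorted_le (x :: xs) (fun x => x) hsort
  -- the two minima agree
  have hEq : m = mn := le_antisymm (hm_le mn hmn_mem) (hmn_le m hm_mem)
  -- A's pop(index(mn)) removes the first occurrence of mn, i.e. computes List.erase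
  obtain ⟨k, hk⟩ : ∃ k, PySem.List.index? (x :: xs) mn = some k :=
    Option.isSome_iff_exists.mp ((PySem.List.index?_isSome_iff _ _).mpr hmn_mem)
  obtain ⟨hklt, hgk, hfirst⟩ := PySem.List.getElem_of_index?_eq_some hk
  have hpop := PySem.List.pop?_natCast (x :: xs) k hklt
  have herase : (x :: xs).eraseIdx k = (x :: xs).erase mn :=
    pv_eraseIdx_eq_erase (x :: xs) k mn hklt (fun _ => hgk) (fun j hj hjk => hfirst j hjk)
  simp only [replace_minimun_with_0, replace_minimun_with_0_alt,
    PySem.List.pyGet?_zero_cons, hsort, hfold]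
  rw [hk]
  simp only [hpop, hEq, PySem.List.remove?_eq_some_erase _ mn hmn_mem, herase]

-- ===== VERDICT (by name: the statement is the Claim_ definition above) =====
theorem replace_minimun_with_0_spec : Claim_equal_replace_minimun_with_0 := by
  intro lst _ hpre
  unfold Spec_replace_minimun_with_0
  exact replace_minimun_with_0_spec_aux lst hpre
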